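-- pv_equiv track=rewrite | github.com/YogeshKumar805/POTD-Geeks-For-Geeks | Tywin's War Strategy.py | minSoldiers
-- ===== SOURCE A (Python) =====
-- def minSoldiers(arr, k):
--     import math
--     key = []
--     count = math.ceil(len(arr)/2)
--     for i in arr:
--         if i%k == 0:
--             count-=1
--         else:
--             key.append(i)
--     if count > 0:
--         for i in range(len(key)):
--             key[i] = key[i]%k
--         key.sort(reverse=True)
--         res = 0
--         for i in range(count):
--             res+= k-key[i]
--         return res
--     return 0
-- ===== SOURCE B (Python) =====
-- def minSoldiers(arr, k):
--     # Quickselect (iterative, LCG-chosen pivot index, three-way partition) instead of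
--     # sorting: find the need-th largest remainder t, then one pass sums k-r over
--     # remainders above t plus a closed-form term for the partial pivot bucket.
--     need = (len(arr) + 1) // 2
--     rems = []
--     for i in arr:
--         r = i % k
--         if r == 0:
--             need -= 1
--         else:
--             rems.append(r)
--     if need <= 0:
--         return 0
--     t = _kth_largest(rems, need)
--     above = 0
--     total = 0
--     for r in rems:
--         if r > t:
--             above += 1
--             total += k - r
--     return total + (need - above) * (k - t)
--
--
-- def _kth_largest(lst, j):
--     seed = 123456789
--     while True:
--         seed = (seed * 1103515245 + 12345) % 2147483648
--         p = lst[seed % len(lst)]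
--         hi = [x for x in lst if x > p]
--         if j <= len(hi):
--             lst = hi
--             continue
--         eq = [x for x in lst if x == p]
--         if j <= len(hi) + len(eq):
--             return p
--         j -= len(hi) + len(eq)
--         lst = [x for x in lst if x < p]
-- ===== Notes on version B (the rewrite author's own statement) =====
-- stated objective: alternative
-- what changed: Replaces A's full descending sort of the remainders and per-index summation by an iterative quickselect (LCG-chosen pivot index, three-way partition) that finds the need-th largest remainder t, followed by one pass summing k-r over remainders above t plus a closed-form term for the partial pivot bucket.
import Mathlib
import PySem

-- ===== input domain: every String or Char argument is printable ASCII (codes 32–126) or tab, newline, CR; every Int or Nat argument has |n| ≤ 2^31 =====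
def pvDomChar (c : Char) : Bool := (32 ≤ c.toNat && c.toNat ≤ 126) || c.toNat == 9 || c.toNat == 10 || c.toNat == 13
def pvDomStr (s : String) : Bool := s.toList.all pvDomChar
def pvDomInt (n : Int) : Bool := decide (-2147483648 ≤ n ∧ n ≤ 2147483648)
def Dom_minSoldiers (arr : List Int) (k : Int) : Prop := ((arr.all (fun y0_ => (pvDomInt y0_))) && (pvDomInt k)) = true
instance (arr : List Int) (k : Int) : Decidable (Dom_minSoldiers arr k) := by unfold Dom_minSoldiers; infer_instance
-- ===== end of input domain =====

-- B replaces A's full descending sort by an iterative quickselect (LCG-chosen pivot)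
-- for the need-th largest remainder plus one summing pass; alternative algorithm, no sort.


-- ===== PORT A =====
-- math.ceil(len(arr)/2) is exact as (n+1)//2 on every list length n (n ≥ 0).
-- key[i] for i in range(count): the index is always in range for k ≠ 0 (proved below),
-- so pyGetD ... 0 is exact on Pre_.
def minSoldiers (arr : List Int) (k : Int) : Int :=
  let st := arr.foldl (fun (s : Int × List Int) i =>
      if PySem.Int.mod i k == 0 then (s.1 - 1, s.2) else (s.1, s.2 ++ [i]))
    (PySem.Int.floordiv ((arr.length : Int) + 1) 2, [])
  let count := st.1
  let key := st.2
  if count > 0 then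
    let key := key.map (fun x => PySem.Int.mod x k)
    let key := PySem.List.sorted key (fun x => x) true
    (PySem.List.pyRange 0 count 1).foldl (fun res i => res + (k - PySem.List.pyGetD key i 0)) 0
  else 0

-- ===== PORT B =====
-- used by the port's decreasing_by and the proofs: the pivot lst[seed % len(lst)]
-- is an element of lst (the index is in [0, len) since the divisor is positive,
-- so Python's lst[...] is in-range indexing and .toNat is exact here)
theorem pivot_mem (a : Int) (rest : List Int) (i : Int) :
    (a :: rest).getD (PySem.Int.mod i ((a :: rest).length : Int)).toNat 0 ∈ a :: rest := by
  have hb : (0 : Int) < ((a :: rest).length : Int) := by exact_mod_cast Nat.succ_pos rest.length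
  have hm : PySem.Int.mod i ((a :: rest).length : Int) = i % ((a :: rest).length : Int) :=
    PySem.Int.mod_eq_emod_of_pos hb
  have h0 : (0 : Int) ≤ PySem.Int.mod i ((a :: rest).length : Int) := by
    rw [hm]; exact Int.emod_nonneg i (by omega)
  have h1 : PySem.Int.mod i ((a :: rest).length : Int) < ((a :: rest).length : Int) := by
    rw [hm]; exact Int.emod_lt_of_pos i hb
  have h : (PySem.Int.mod i ((a :: rest).length : Int)).toNat < (a :: rest).length := by omega
  rw [List.getD_eq_getElem?_getD, List.getElem?_eq_getElem h]
  exact List.getElem_mem h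

-- _kth_largest: the Python while loop, as well-founded recursion on the shrinking lst,
-- with the LCG seed threaded through (the [] case is a totality guard; the loop is
-- only entered with 1 ≤ j ≤ len(lst))
def kthSel : List Int → Int → Int → Int
  | [], _, _ => 0
  | a :: rest, j, seed =>
    let s2 := PySem.Int.mod (seed * 1103515245 + 12345) 2147483648
    let p := (a :: rest).getD (PySem.Int.mod s2 ((a :: rest).length : Int)).toNat 0
    let hi := (a :: rest).filter (fun x => p < x)
    if j ≤ (hi.length : Int) then kthSel hi j s2
    else
      let eq := (a :: rest).filter (fun x => x == p)
      if j ≤ (hi.length : Int) + (eq.length : Int) then p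
      else kthSel ((a :: rest).filter (fun x => x < p)) (j - hi.length - eq.length) s2
  termination_by lst _ _ => lst.length
  decreasing_by
  · exact (List.length_filter_lt_length_iff_exists).mpr
      ⟨p, pivot_mem a rest s2, fun hc => lt_irrefl p (of_decide_eq_true hc)⟩
  · exact (List.length_filter_lt_length_iff_exists).mpr
      ⟨p, pivot_mem a rest s2, fun hc => lt_irrefl p (of_decide_eq_true hc)⟩

def kthLargest (lst : List Int) (j : Int) : Int := kthSel lst j 123456789

def minSoldiers_alt (arr : List Int) (k : Int) : Int :=
  let st := arr.foldl (fun (s : Int × List Int) i =>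
      let r := PySem.Int.mod i k
      if r == 0 then (s.1 - 1, s.2) else (s.1, s.2 ++ [r]))
    (PySem.Int.floordiv ((arr.length : Int) + 1) 2, [])
  let need := st.1
  let rems := st.2
  if need ≤ 0 then 0
  else
    let t := kthLargest rems need
    let res := rems.foldl (fun (s : Int × Int) r =>
        if r > t then (s.1 + 1, s.2 + (k - r)) else s) (0, 0)
    res.2 + (need - res.1) * (k - t)

-- ===== PRECONDITION & SPEC =====
-- Pre_ excludes exactly the inputs where Python A raises: k = 0 with a nonempty arr (ZeroDivisionError from i % 0).
def Pre_minSoldiers (arr : List Int) (k : Int) : Prop := k ≠ 0 ∨ arr = []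
instance (arr : List Int) (k : Int) : Decidable (Pre_minSoldiers arr k) := by unfold Pre_minSoldiers; infer_instance
def pvWitness_minSoldiers : List Int × Int := ([3, 5, 6, 8], 4)
def Spec_minSoldiers (arr : List Int) (k : Int) (out : Int) : Prop := out = minSoldiers_alt arr k
instance (arr : List Int) (k : Int) (out : Int) : Decidable (Spec_minSoldiers arr k out) := by unfold Spec_minSoldiers; infer_instance

-- ===== CLAIM (what is proved, stated in full; the proofs are below) =====
def Claim_equal_minSoldiers : Prop := ∀ (arr : List Int) (k : Int), Dom_minSoldiers arr k → Pre_minSoldiers arr k → Spec_minSoldiers arr k (minSoldiers arr k)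

-- ===== LEMMAS AND PROOFS =====

theorem foldA (k : Int) (l : List Int) (c : Int) (key0 : List Int) :
    l.foldl (fun (s : Int × List Int) i =>
      if PySem.Int.mod i k == 0 then (s.1 - 1, s.2) else (s.1, s.2 ++ [i])) (c, key0)
    = (c - l.countP (fun i => PySem.Int.mod i k == 0),
       key0 ++ l.filter (fun i => !(PySem.Int.mod i k == 0))) := by
  induction l generalizing c key0 with
  | nil => simp
  | cons h t ih =>
    rw [List.foldl_cons]
    by_cases hp : (PySem.Int.mod h k == 0) = true
    · rw [if_pos hp, ih]
      simp [hp, Prod.ext_iff]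
      omega
    · rw [if_neg hp, ih]
      simp at hp
      simp [hp]

theorem foldB (k : Int) (l : List Int) (c : Int) (acc : List Int) :
    l.foldl (fun (s : Int × List Int) i =>
      let r := PySem.Int.mod i k
      if r == 0 then (s.1 - 1, s.2) else (s.1, s.2 ++ [r])) (c, acc)
    = (c - l.countP (fun i => PySem.Int.mod i k == 0),
       acc ++ (l.filter (fun i => !(PySem.Int.mod i k == 0))).map (fun i => PySem.Int.mod i k)) := by
  induction l generalizing c acc with
  | nil => simp
  | cons h t ih =>
    rw [List.foldl_cons]
    by_cases hp : (PySem.Int.mod h k == 0) = true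
    · simp only [hp, if_true]
      rw [ih]
      simp [hp, Prod.ext_iff]
      omega
    · simp only [hp]
      rw [ih]
      simp at hp
      simp [hp]

theorem foldC (k t : Int) (l : List Int) (a b : Int) :
    l.foldl (fun (s : Int × Int) r =>
        if r > t then (s.1 + 1, s.2 + (k - r)) else s) (a, b)
    = (a + (l.countP (fun r => t < r) : Int),
       b + ((l.filter (fun r => t < r)).map (fun r => k - r)).sum) := by
  induction l generalizing a b with
  | nil => simp
  | cons h tl ih =>
    rw [List.foldl_cons]
    by_cases hp : (t < h)
    · rw [if_pos hp, ih]
      simp [hp, Prod.ext_iff]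
      constructor <;> push_cast <;> ring
    · rw [if_neg hp, ih]
      simp [hp]

theorem countP_tri (p : Int) (q : Int → Bool) (l : List Int) :
    l.countP q = l.countP (fun x => q x && decide (p < x))
      + l.countP (fun x => q x && (x == p))
      + l.countP (fun x => q x && decide (x < p)) := by
  induction l with
  | nil => simp
  | cons a tl ih =>
    simp only [List.countP_cons, ih]
    rcases lt_trichotomy p a with h | h | h
    · by_cases hq : q a = true <;> simp [hq, h, h.ne', lt_asymm h] <;> omega
    · subst h
      by_cases hq : q p = true <;> simp [hq] <;> omega
    · by_cases hq : q a = true <;> simp [hq, h, h.ne, lt_asymm h] <;> omega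

theorem countP_le_split (p : Int) (l : List Int) :
    l.countP (fun x => p ≤ x)
      = l.countP (fun x => p < x) + l.countP (fun x => x == p) := by
  induction l with
  | nil => simp
  | cons a tl ih =>
    simp only [List.countP_cons, ih]
    rcases lt_trichotomy p a with h | h | h
    · simp [h, le_of_lt h, h.ne']
      omega
    · subst h
      simp
      omega
    · simp [h.ne, not_le_of_gt h, not_lt_of_gt h]

-- quickselect correctness: the result is a member with fewer than j elements above it
-- and at least j elements at-or-above it
theorem kth_good_aux (n : Nat) : ∀ (lst : List Int) (j seed : Int), lst.length = n →
    1 ≤ j → j ≤ (lst.length : Int) →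
    kthSel lst j seed ∈ lst ∧
    ((lst.countP (fun x => kthSel lst j seed < x) : Int) < j ∧
      j ≤ (lst.countP (fun x => kthSel lst j seed ≤ x) : Int)) := by
  induction n using Nat.strong_induction_on with
  | _ n ih =>
    intro lst j seed hlen h1 h2
    match lst with
    | [] => simp at h2; omega
    | a :: rest =>
      simp only [kthSel]
      set s2 := PySem.Int.mod (seed * 1103515245 + 12345) 2147483648 with hs2
      set p := (a :: rest).getD (PySem.Int.mod s2 ((a :: rest).length : Int)).toNat 0 with hp
      set hi := (a :: rest).filter (fun x => decide (p < x)) with hhi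
      set eqs := (a :: rest).filter (fun x => x == p) with heqs
      set lo := (a :: rest).filter (fun x => decide (x < p)) with hlo
      have hpmem : p ∈ a :: rest := pivot_mem a rest s2
      have hilt : hi.length < (a :: rest).length := by
        rw [hhi]
        exact (List.length_filter_lt_length_iff_exists).mpr ⟨p, hpmem, by simp⟩
      have hlolt : lo.length < (a :: rest).length := by
        rw [hlo]
        exact (List.length_filter_lt_length_iff_exists).mpr ⟨p, hpmem, by simp⟩
      have hlen3 : (a :: rest).length = hi.length + eqs.length + lo.length := by
        have h3 := countP_tri p (fun _ => true) (a :: rest)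
        simp only [List.countP_true, Bool.true_and] at h3
        rw [List.countP_eq_length_filter, List.countP_eq_length_filter,
          List.countP_eq_length_filter] at h3
        rw [← hhi, ← heqs, ← hlo] at h3
        exact h3
      split_ifs with hb1 hb2
      · -- recurse into hi
        obtain ⟨hv, hc1, hc2⟩ := ih hi.length (hlen ▸ hilt) hi j s2 rfl h1 hb1
        set v := kthSel hi j s2 with hvv
        have hpv : p < v := by
          rw [hhi] at hv
          simpa using (List.mem_filter.mp hv).2
        refine ⟨List.mem_of_mem_filter (hhi ▸ hv), ?_, ?_⟩
        · have he : (a :: rest).countP (fun x => decide (v < x))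
              = hi.countP (fun x => decide (v < x)) := by
            rw [hhi, List.countP_filter]
            apply List.countP_congr
            intro x _
            by_cases hx : v < x
            · simp [hx, lt_trans hpv hx]
            · simp [hx]
          rw [he]; exact hc1
        · have he : (a :: rest).countP (fun x => decide (v ≤ x))
              = hi.countP (fun x => decide (v ≤ x)) := by
            rw [hhi, List.countP_filter]
            apply List.countP_congr
            intro x _
            by_cases hx : v ≤ x
            · simp [hx, lt_of_lt_of_le hpv hx]
            · simp [hx]
          rw [he]; exact hc2
      · -- return the pivot
        refine ⟨hpmem, ?_, ?_⟩
        · have he : (a :: rest).countP (fun x => decide (p < x)) = hi.length := by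
            rw [hhi, List.countP_eq_length_filter]
          rw [he]; omega
        · have he : (a :: rest).countP (fun x => decide (p ≤ x))
              = hi.length + eqs.length := by
            rw [countP_le_split p (a :: rest), hhi, heqs,
              List.countP_eq_length_filter, List.countP_eq_length_filter]
          rw [he]
          push_cast
          omega
      · -- recurse into lo
        have hj1' : 1 ≤ j - hi.length - eqs.length := by push_cast at hb2 ⊢; omega
        have hj2' : j - hi.length - eqs.length ≤ (lo.length : Int) := by
          have hlen3' : ((a :: rest).length : Int)
              = (hi.length : Int) + (eqs.length : Int) + (lo.length : Int) := by
            exact_mod_cast hlen3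
          omega
        obtain ⟨hv, hc1, hc2⟩ := ih lo.length (hlen ▸ hlolt) lo _ s2 rfl hj1' hj2'
        set v := kthSel lo (j - hi.length - eqs.length) s2 with hvv
        have hvp : v < p := by
          rw [hlo] at hv
          simpa using (List.mem_filter.mp hv).2
        refine ⟨List.mem_of_mem_filter (hlo ▸ hv), ?_, ?_⟩
        · have he : (a :: rest).countP (fun x => decide (v < x))
              = hi.length + eqs.length + lo.countP (fun x => decide (v < x)) := by
            have h3 := countP_tri p (fun x => decide (v < x)) (a :: rest)
            have e1 : (a :: rest).countP (fun x => decide (v < x) && decide (p < x))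
                = hi.length := by
              have hcc : (a :: rest).countP (fun x => decide (v < x) && decide (p < x))
                  = (a :: rest).countP (fun x => decide (p < x)) := by
                apply List.countP_congr
                intro x _
                by_cases hx : p < x
                · simp [hx, lt_trans hvp hx]
                · simp [hx]
              rw [hcc, hhi, List.countP_eq_length_filter]
            have e2 : (a :: rest).countP (fun x => decide (v < x) && (x == p))
                = eqs.length := by
              have hcc : (a :: rest).countP (fun x => decide (v < x) && (x == p))
                  = (a :: rest).countP (fun x => x == p) := by
                apply List.countP_congr
                intro x _
                by_cases hx : x = p
                · subst hx; simp [hvp]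
                · simp [hx]
              rw [hcc, heqs, List.countP_eq_length_filter]
            have e3 : (a :: rest).countP (fun x => decide (v < x) && decide (x < p))
                = lo.countP (fun x => decide (v < x)) := by
              rw [hlo, List.countP_filter]
            rw [h3, e1, e2, e3]
          rw [he]
          push_cast
          omega
        · have he : (a :: rest).countP (fun x => decide (v ≤ x))
              = hi.length + eqs.length + lo.countP (fun x => decide (v ≤ x)) := by
            have h3 := countP_tri p (fun x => decide (v ≤ x)) (a :: rest)
            have e1 : (a :: rest).countP (fun x => decide (v ≤ x) && decide (p < x))
                = hi.length := by
              have hcc : (a :: rest).countP (fun x => decide (v ≤ x) && decide (p < x))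
                  = (a :: rest).countP (fun x => decide (p < x)) := by
                apply List.countP_congr
                intro x _
                by_cases hx : p < x
                · simp [hx, le_of_lt (lt_trans hvp hx)]
                · simp [hx]
              rw [hcc, hhi, List.countP_eq_length_filter]
            have e2 : (a :: rest).countP (fun x => decide (v ≤ x) && (x == p))
                = eqs.length := by
              have hcc : (a :: rest).countP (fun x => decide (v ≤ x) && (x == p))
                  = (a :: rest).countP (fun x => x == p) := by
                apply List.countP_congr
                intro x _
                by_cases hx : x = p
                · subst hx; simp [le_of_lt hvp]
                · simp [hx]
              rw [hcc, heqs, List.countP_eq_length_filter]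
            have e3 : (a :: rest).countP (fun x => decide (v ≤ x) && decide (x < p))
                = lo.countP (fun x => decide (v ≤ x)) := by
              rw [hlo, List.countP_filter]
            rw [h3, e1, e2, e3]
          rw [he]
          push_cast
          omega

theorem kth_good (lst : List Int) (j : Int) (h1 : 1 ≤ j) (h2 : j ≤ (lst.length : Int)) :
    kthLargest lst j ∈ lst ∧
    ((lst.countP (fun x => kthLargest lst j < x) : Int) < j ∧
      j ≤ (lst.countP (fun x => kthLargest lst j ≤ x) : Int)) := by
  unfold kthLargest
  exact kth_good_aux lst.length lst j 123456789 rfl h1 h2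

-- descending list: the elements greater than t form the prefix of length countP (t < ·)
theorem desc_filter_prefix (t : Int) (s : List Int)
    (h : s.Pairwise (fun a b : Int => b ≤ a)) :
    s.filter (fun x => t < x) = s.take (s.countP (fun x => t < x)) := by
  induction s with
  | nil => simp
  | cons a rest ih =>
    rw [List.pairwise_cons] at h
    by_cases ha : t < a
    · simp only [List.filter_cons, List.countP_cons, ha, decide_true]
      simp [ih h.2]
    · have hall : ∀ x ∈ a :: rest, ¬ (t < x) := by
        intro x hx
        rcases List.mem_cons.mp hx with rfl | hx
        · omega
        · have := h.1 x hx; omega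
      have h0 : (a :: rest).countP (fun x => t < x) = 0 := by
        apply List.countP_eq_zero.mpr
        intro x hx
        simp [hall x hx]
      rw [h0, List.take_zero, List.filter_eq_nil_iff.mpr]
      intro x hx
      simp [hall x hx]

theorem desc_take_ge (t : Int) (s : List Int)
    (h : s.Pairwise (fun a b : Int => b ≤ a)) (n : Nat)
    (hn : n ≤ s.countP (fun x => t ≤ x)) :
    ∀ x ∈ s.take n, t ≤ x := by
  induction s generalizing n with
  | nil => simp
  | cons a rest ih =>
    rw [List.pairwise_cons] at h
    cases n with
    | zero => simp
    | succ m =>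
      by_cases ha : t ≤ a
      · intro x hx
        rw [List.take_succ_cons] at hx
        rcases List.mem_cons.mp hx with rfl | hx
        · exact ha
        · refine ih h.2 m ?_ x hx
          simp [List.countP_cons, ha] at hn
          omega
      · exfalso
        have h0 : (a :: rest).countP (fun x => t ≤ x) = 0 := by
          apply List.countP_eq_zero.mpr
          intro x hx
          rcases List.mem_cons.mp hx with rfl | hx
          · simp [ha]
          · have := h.1 x hx
            simp; omega
        omega

theorem desc_drop_le (t : Int) (s : List Int)
    (h : s.Pairwise (fun a b : Int => b ≤ a)) :
    ∀ x ∈ s.drop (s.countP (fun x => t < x)), x ≤ t := by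
  induction s with
  | nil => simp
  | cons a rest ih =>
    rw [List.pairwise_cons] at h
    by_cases ha : t < a
    · simp only [List.countP_cons, ha, decide_true]
      intro x hx
      exact ih h.2 x (by simpa using hx)
    · have h0 : (a :: rest).countP (fun x => t < x) = 0 := by
        apply List.countP_eq_zero.mpr
        intro x hx
        rcases List.mem_cons.mp hx with rfl | hx
        · simp [ha]
        · have := h.1 x hx
          simp; omega
      rw [h0, List.drop_zero]
      intro x hx
      rcases List.mem_cons.mp hx with rfl | hx
      · omega
      · have := h.1 x hx; omega

theorem sum_take_eq (k t : Int) (s : List Int)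
    (h : s.Pairwise (fun a b : Int => b ≤ a)) (n : Nat)
    (hle : n ≤ s.length)
    (hgt : s.countP (fun x => t < x) < n)
    (hge : n ≤ s.countP (fun x => t ≤ x)) :
    ((s.take n).map (fun x => k - x)).sum
      = ((s.filter (fun x => t < x)).map (fun x => k - x)).sum
        + ((n : Int) - (s.countP (fun x => t < x) : Int)) * (k - t) := by
  set m := s.countP (fun x => decide (t < x)) with hm
  have hmn : m ≤ n := le_of_lt hgt
  have h1 : s.take n = s.take m ++ (s.drop m).take (n - m) := by
    conv_lhs => rw [← List.take_append_drop m (s.take n)]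
    rw [List.take_take, min_eq_left hmn, List.drop_take]
  have h2 : s.take m = s.filter (fun x => decide (t < x)) := by
    rw [desc_filter_prefix t s h, hm]
  set mid := (s.drop m).take (n - m) with hmid
  have hmidlen : mid.length = n - m := by
    rw [hmid]
    simp only [List.length_take, List.length_drop]
    omega
  have hmide : ∀ x ∈ mid, x = t := by
    intro x hx
    have hx1 : x ∈ s.drop m := List.mem_of_mem_take (by rw [← hmid]; exact hx)
    have hle1 : x ≤ t := desc_drop_le t s h x (hm ▸ hx1)
    have hx2 : x ∈ s.take n := by
      rw [h1]
      exact List.mem_append_right _ (hmid ▸ hx)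
    have hle2 : t ≤ x := desc_take_ge t s h n hge x hx2
    omega
  have hmidrep : mid = List.replicate mid.length t := List.eq_replicate_of_mem hmide
  rw [h1, ← h2, List.map_append, List.sum_append, h2, hmidrep, List.map_replicate,
    List.sum_replicate, hmidlen, nsmul_eq_mul]
  have hc : ((n - m : Nat) : Int) = (n : Int) - (m : Int) := by
    push_cast [hmn]
    ring
  rw [hc]

theorem sumA (k : Int) (s : List Int) (count : Int) (h0 : 0 ≤ count)
    (hle : count.toNat ≤ s.length) :
    (PySem.List.pyRange 0 count 1).foldl (fun res i => res + (k - PySem.List.pyGetD s i 0)) 0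
      = ((s.take count.toNat).map (fun x => k - x)).sum := by
  have hc : count = (count.toNat : Int) := (Int.toNat_of_nonneg h0).symm
  rw [hc]
  have hr : PySem.List.pyRange 0 ((count.toNat : Nat) : Int) 1
      = List.map (fun j : Nat => (j : Int)) (List.range count.toNat) := by
    have := PySem.List.pyRange_zero_natCast count.toNat
    simpa using this
  rw [hr, List.foldl_map]
  rw [PySem.List.foldl_add]
  simp only [Int.toNat_natCast]
  have : (List.map (fun j : Nat => k - PySem.List.pyGetD s (j : Int) 0) (List.range count.toNat))
      = (s.take count.toNat).map (fun x => k - x) := by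
    apply List.ext_getElem
    · simp [hle]
    · intro i h1 h2
      simp only [List.getElem_map, List.getElem_range, List.getElem_take]
      rw [PySem.List.pyGetD_natCast]
      congr 1
      rw [List.getD_eq_getElem?_getD]
      simp at h1 h2 ⊢
      rw [List.getElem?_eq_getElem (by omega)]
      simp
  rw [← this]
  simp

theorem core (k count : Int) (rems : List Int) (hcle : count.toNat ≤ rems.length) :
    (if count > 0 then
        (PySem.List.pyRange 0 count 1).foldl
          (fun res i =>
            res + (k - PySem.List.pyGetD (PySem.List.sorted rems (fun x => x) true) i 0)) 0
      else 0)
    = (if count ≤ 0 then 0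
      else
        (rems.foldl (fun (s : Int × Int) r =>
            if r > kthLargest rems count then (s.1 + 1, s.2 + (k - r)) else s) (0, 0)).2
          + (count - (rems.foldl (fun (s : Int × Int) r =>
              if r > kthLargest rems count then (s.1 + 1, s.2 + (k - r)) else s) (0, 0)).1)
            * (k - kthLargest rems count)) := by
  by_cases hpos : count > 0
  · rw [if_pos hpos, if_neg (by omega)]
    rw [foldC]
    rw [sumA k (PySem.List.sorted rems (fun x => x) true) count (by omega)
      (by rw [PySem.List.length_sorted]; exact hcle)]
    obtain ⟨hvmem, hg1, hg2⟩ := kth_good rems count (by omega) (by omega)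
    generalize ht : kthLargest rems count = t
    rw [ht] at hg1 hg2
    have hperm : (PySem.List.sorted rems (fun x => x) true).Perm rems :=
      PySem.List.sorted_perm _ _ _
    have hpair : (PySem.List.sorted rems (fun x => x) true).Pairwise (fun a b : Int => b ≤ a) :=
      PySem.List.sorted_pairwise_rev _ _
    have hcnt1 : (PySem.List.sorted rems (fun x => x) true).countP (fun x => decide (t < x))
        = rems.countP (fun x => decide (t < x)) := hperm.countP_eq _
    have hcnt2 : (PySem.List.sorted rems (fun x => x) true).countP (fun x => decide (t ≤ x))
        = rems.countP (fun x => decide (t ≤ x)) := hperm.countP_eq _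
    rw [sum_take_eq k t (PySem.List.sorted rems (fun x => x) true) hpair count.toNat
      (by rw [PySem.List.length_sorted]; exact hcle)
      (by rw [hcnt1]; omega)
      (by rw [hcnt2]; omega)]
    have hfsum : (((PySem.List.sorted rems (fun x => x) true).filter
          (fun x => decide (t < x))).map (fun x => k - x)).sum
        = ((rems.filter (fun x => decide (t < x))).map (fun x => k - x)).sum :=
      ((hperm.filter _).map _).sum_eq
    rw [hfsum, hcnt1, Int.toNat_of_nonneg (le_of_lt hpos)]
    ring
  · rw [if_neg hpos, if_pos (by omega)]

theorem hcle_lemma (k : Int) (arr : List Int) :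
    (PySem.Int.floordiv ((arr.length : Int) + 1) 2
      - (arr.countP (fun i => PySem.Int.mod i k == 0) : Int)).toNat
      ≤ ((arr.filter (fun i => !(PySem.Int.mod i k == 0))).map
          (fun i => PySem.Int.mod i k)).length := by
  rw [List.length_map]
  have h := List.length_eq_countP_add_countP (fun i => PySem.Int.mod i k == 0) (l := arr)
  have h2 : List.countP (fun a => decide ¬((PySem.Int.mod a k == 0) = true)) arr
      = (arr.filter (fun i => !(PySem.Int.mod i k == 0))).length := by
    rw [List.countP_eq_length_filter]
    congr 1
    apply List.filter_congr
    intro x _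
    by_cases hx : PySem.Int.mod x k = 0 <;> simp [hx]
  have hfd : PySem.Int.floordiv ((arr.length : Int) + 1) 2
      = (((arr.length + 1) / 2 : Nat) : Int) := by
    exact_mod_cast PySem.Int.floordiv_natCast (arr.length + 1) 2
  rw [hfd]
  omega

theorem minSoldiers_main (arr : List Int) (k : Int) :
    minSoldiers arr k = minSoldiers_alt arr k := by
  unfold minSoldiers minSoldiers_alt
  rw [foldA, foldB]
  exact core k
    (PySem.Int.floordiv ((arr.length : Int) + 1) 2
      - (arr.countP (fun i => PySem.Int.mod i k == 0) : Int))
    ((arr.filter (fun i => !(PySem.Int.mod i k == 0))).map (fun i => PySem.Int.mod i k))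
    (hcle_lemma k arr)

-- ===== VERDICT (by name: the statement is the Claim_ definition above) =====
theorem minSoldiers_spec : Claim_equal_minSoldiers := by
  intro arr k _ _
  unfold Spec_minSoldiers
  exact minSoldiers_main arr k
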